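-- pv_equiv track=rewrite | github.com/scoolywooly/chess | src/game.py | square_clicked
-- ===== SOURCE A (Python) =====
-- import math
--
-- def square_clicked(mouse_pos, square_size=100):
--     x = mouse_pos[0]
--     y = mouse_pos[1]
--
--     # use the floor and ceil to define the edges of the square
--
--     left_edge = math.floor(x / square_size) * square_size
--     bottom_edge = math.ceil(y / square_size) * square_size
--
--
--     # Then I find the cords using the matrix, and a list of rows and columns
--     board = [0, 100, 200, 300, 400, 500, 600, 700]
--     square_x = 0 # [x, y]
--     square_y = 0
--     for square in range(len(board)):
--         if left_edge == board[square]: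
--             square_x = square + 1
--     for square in range(len(board)):
--         if bottom_edge - 100== board[square]: # Its on the bottom, so if i don't minues 100, it looks for an imaginary row that isn't in board
--             square_y = square + 1
--
--
--     square = [square_x, square_y]
--
--     return square
-- ===== SOURCE B (Python) =====
-- def square_clicked(mouse_pos, square_size=100):
--     x, y = mouse_pos
--     left_edge = (x // square_size) * square_size
--     bottom_edge = -((-y) // square_size) * square_size
--
--     def index(edge):
--         # closed-form: board rows are the multiples of 100 in [0, 700]
--         return edge // 100 + 1 if 0 <= edge <= 700 and edge % 100 == 0 else 0
--
--     return [index(left_edge), index(bottom_edge - 100)]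
-- ===== Notes on version B (the rewrite author's own statement) =====
-- stated objective: simpler
-- what changed: Replaced the two linear scans over the hardcoded board list by a closed-form arithmetic test (edge is a multiple of 100 in [0,700] -> edge//100+1, else 0), and the float floor/ceil by exact integer floor/ceil division; the board list disappears.
import Mathlib
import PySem

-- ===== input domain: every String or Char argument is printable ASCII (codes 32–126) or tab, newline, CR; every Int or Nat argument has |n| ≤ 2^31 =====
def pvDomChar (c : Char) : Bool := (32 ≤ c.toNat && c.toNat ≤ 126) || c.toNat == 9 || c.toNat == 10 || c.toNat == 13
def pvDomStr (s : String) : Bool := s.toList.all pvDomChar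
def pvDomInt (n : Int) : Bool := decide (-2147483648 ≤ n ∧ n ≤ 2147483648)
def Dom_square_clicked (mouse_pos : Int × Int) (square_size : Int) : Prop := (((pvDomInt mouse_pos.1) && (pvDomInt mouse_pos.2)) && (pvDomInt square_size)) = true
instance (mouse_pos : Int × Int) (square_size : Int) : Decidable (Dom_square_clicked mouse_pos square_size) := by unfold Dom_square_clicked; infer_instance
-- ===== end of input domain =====

-- B replaces A's two scans over the board list by a closed-form arithmetic index; equivalence is about the return value only.
-- ===== PORT A =====
-- math.floor(x / square_size) / math.ceil(y / square_size) are ported as exact integer floor/ceil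
-- division: for |x|,|y|,|square_size| ≤ 2^31 the one float rounding (error ≤ 2⁻⁵³·|q|) cannot move
-- the quotient across an integer (distance ≥ 1/|square_size|), so floor/ceil of the float equals the exact value.
def square_clicked (mouse_pos : Int × Int) (square_size : Int) : List Int :=
  let x := mouse_pos.1
  let y := mouse_pos.2
  let left_edge := (PySem.Int.floordiv x square_size) * square_size
  let bottom_edge := (-(PySem.Int.floordiv (-y) square_size)) * square_size
  let board : List Int := [0, 100, 200, 300, 400, 500, 600, 700]
  let square_x := (PySem.List.pyRange 0 (PySem.List.len board) 1).foldl
    (fun acc square => if left_edge = PySem.List.pyGetD board square 0 then square + 1 else acc) 0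
  let square_y := (PySem.List.pyRange 0 (PySem.List.len board) 1).foldl
    (fun acc square => if bottom_edge - 100 = PySem.List.pyGetD board square 0 then square + 1 else acc) 0
  [square_x, square_y]

-- ===== PORT B =====
def pvIndex (edge : Int) : Int :=
  if 0 ≤ edge ∧ edge ≤ 700 ∧ PySem.Int.mod edge 100 = 0 then PySem.Int.floordiv edge 100 + 1 else 0

def square_clicked_alt (mouse_pos : Int × Int) (square_size : Int) : List Int :=
  let left_edge := (PySem.Int.floordiv mouse_pos.1 square_size) * square_size
  let bottom_edge := (-(PySem.Int.floordiv (-mouse_pos.2) square_size)) * square_size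
  [pvIndex left_edge, pvIndex (bottom_edge - 100)]

-- ===== PRECONDITION & SPEC =====
-- Python A raises ZeroDivisionError when square_size = 0; that is all Pre_ excludes.
def Pre_square_clicked (mouse_pos : Int × Int) (square_size : Int) : Prop := square_size ≠ 0
instance (mouse_pos : Int × Int) (square_size : Int) : Decidable (Pre_square_clicked mouse_pos square_size) := by unfold Pre_square_clicked; infer_instance
def pvWitness_square_clicked : (Int × Int) × Int := ((150, 250), 100)

def Spec_square_clicked (mouse_pos : Int × Int) (square_size : Int) (out : List Int) : Prop := out = square_clicked_alt mouse_pos square_size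
instance (mouse_pos : Int × Int) (square_size : Int) (out : List Int) : Decidable (Spec_square_clicked mouse_pos square_size out) := by unfold Spec_square_clicked; infer_instance

-- ===== CLAIM (what is proved, stated in full; the proofs are below) =====
def Claim_equal_square_clicked : Prop := ∀ (mouse_pos : Int × Int) (square_size : Int), Dom_square_clicked mouse_pos square_size → Pre_square_clicked mouse_pos square_size → Spec_square_clicked mouse_pos square_size (square_clicked mouse_pos square_size)

-- ===== LEMMAS AND PROOFS =====
-- A's scan over the fixed board list equals B's closed-form index, for ANY edge value.
lemma scan_eq_pvIndex (e : Int) :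
    (PySem.List.pyRange 0 (PySem.List.len ([0, 100, 200, 300, 400, 500, 600, 700] : List Int)) 1).foldl
      (fun acc square => if e = PySem.List.pyGetD ([0, 100, 200, 300, 400, 500, 600, 700] : List Int) square 0 then square + 1 else acc) 0
    = pvIndex e := by
  have hr : PySem.List.pyRange 0 (PySem.List.len ([0, 100, 200, 300, 400, 500, 600, 700] : List Int)) 1
      = [0, 1, 2, 3, 4, 5, 6, 7] := by decide
  rw [hr]
  have p0 : PySem.List.pyGetD ([0, 100, 200, 300, 400, 500, 600, 700] : List Int) 0 0 = 0 := by decide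
  have p1 : PySem.List.pyGetD ([0, 100, 200, 300, 400, 500, 600, 700] : List Int) 1 0 = 100 := by decide
  have p2 : PySem.List.pyGetD ([0, 100, 200, 300, 400, 500, 600, 700] : List Int) 2 0 = 200 := by decide
  have p3 : PySem.List.pyGetD ([0, 100, 200, 300, 400, 500, 600, 700] : List Int) 3 0 = 300 := by decide
  have p4 : PySem.List.pyGetD ([0, 100, 200, 300, 400, 500, 600, 700] : List Int) 4 0 = 400 := by decide
  have p5 : PySem.List.pyGetD ([0, 100, 200, 300, 400, 500, 600, 700] : List Int) 5 0 = 500 := by decide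
  have p6 : PySem.List.pyGetD ([0, 100, 200, 300, 400, 500, 600, 700] : List Int) 6 0 = 600 := by decide
  have p7 : PySem.List.pyGetD ([0, 100, 200, 300, 400, 500, 600, 700] : List Int) 7 0 = 700 := by decide
  simp only [List.foldl, p0, p1, p2, p3, p4, p5, p6, p7]
  have hm := PySem.Int.mod_eq_emod_of_pos (a := e) (b := 100) (by norm_num)
  have hd := PySem.Int.floordiv_eq_ediv_of_pos (a := e) (b := 100) (by norm_num)
  unfold pvIndex
  split_ifs <;> omega

-- ===== VERDICT (by name: the statement is the Claim_ definition above) =====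
theorem square_clicked_spec : Claim_equal_square_clicked := by
  intro mp s _ _
  unfold Spec_square_clicked square_clicked square_clicked_alt
  simp only []
  rw [scan_eq_pvIndex, scan_eq_pvIndex]
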